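-- pv_equiv track=rewrite | github.com/joseph415/algorithm | gbia/3.py | solution
-- ===== SOURCE A (Python) =====
-- import heapq
--
-- def solution(N, coffee_times):
--     answer = []
--     temp = []
--     priority = []
--
--     for index, delay in enumerate(coffee_times):
--         temp.append([delay, index])
--
--     for i in range(N):
--         heapq.heappush(priority, temp[i])
--
--     index = N
--     time = 0
--     while priority:
--         heappop = heapq.heappop(priority)
--         time += heappop[0]
--         answer.append(heappop[1] + 1)
--         if index < len(coffee_times):
--             heapq.heappush(priority, temp[index])
--         for i in range(len(priority)):
--             priority[i][0] += time
--         index += 1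
--
--     return answer
-- ===== SOURCE B (Python) =====
-- def solution(N, coffee_times):
--     # Sorted pending list with a lazy global offset instead of A's heap whose
--     # every key is rewritten each iteration: an element admitted when the
--     # accumulated offset is `off` is stored with key (delay - off, index);
--     # uniform shifts never change relative order, so the service order is A's.
--     def insort(lst, item):
--         i = 0
--         while i < len(lst) and lst[i] < item:
--             i += 1
--         lst.insert(i, item)
--
--     pending = []
--     for i in range(N):
--         insort(pending, (coffee_times[i], i))
--
--     answer = []
--     index = N
--     time = 0
--     off = 0
--     while pending:
--         k, j = pending.pop(0)
--         time += k + off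
--         answer.append(j + 1)
--         if index < len(coffee_times):
--             insort(pending, (coffee_times[index] - off, index))
--         off += time
--         index += 1
--     return answer
-- ===== Notes on version B (the rewrite author's own statement) =====
-- stated objective: alternative
-- what changed: A keeps a heap and rewrites every key in it with a Python-level loop on every iteration; B keeps a plain ascending sorted list with a lazy global offset folded into the key at admission time, so it pops the head and does one sorted-insertion scan per step and never rewrites an entry.
import Mathlib
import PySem

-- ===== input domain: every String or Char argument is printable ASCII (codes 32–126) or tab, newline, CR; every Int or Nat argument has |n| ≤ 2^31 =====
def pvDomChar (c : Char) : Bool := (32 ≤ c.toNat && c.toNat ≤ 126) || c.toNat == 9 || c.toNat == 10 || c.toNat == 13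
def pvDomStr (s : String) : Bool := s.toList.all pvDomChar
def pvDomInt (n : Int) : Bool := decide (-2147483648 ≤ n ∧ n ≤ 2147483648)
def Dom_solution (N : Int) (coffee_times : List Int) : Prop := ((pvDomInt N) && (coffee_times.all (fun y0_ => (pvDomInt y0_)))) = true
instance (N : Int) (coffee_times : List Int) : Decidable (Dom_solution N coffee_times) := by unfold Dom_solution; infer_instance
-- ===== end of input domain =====

-- B replaces A's heap — whose every key A rewrites with a Python-level loop on every
-- iteration — by a plain ascending sorted list with a lazy global offset folded into the
-- key at admission time; same service order, nothing is ever rewritten.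
-- heapq is modelled semantically: all keys are distinct ([delay, index] with distinct
-- indices), so heappop returns the lexicographic minimum of the heap's contents and the
-- heap itself is faithfully represented as a list of its elements; heappush is append.
-- A's in-place `priority[i][0] += time` also mutates the shared `temp` lists, but only
-- entries already in the heap — `temp[index]` at push time is always still pristine —
-- so `temp` is ported as an immutable list.

-- ===== PORT A =====
-- heapq comparison on [delay, index] pairs (lexicographic; keys are distinct)
def pvLexLt (a b : Int × Int) : Bool := a.1 < b.1 || (a.1 == b.1 && a.2 < b.2)

-- heapq.heappop: extract the minimum element, return it and the remaining elements
def pvPopMin : (Int × Int) → List (Int × Int) → (Int × Int) × List (Int × Int)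
  | m, [] => (m, [])
  | m, x :: xs =>
    if pvLexLt x m then
      let r := pvPopMin x xs
      (r.1, m :: r.2)
    else
      let r := pvPopMin m xs
      (r.1, x :: r.2)

-- the `while priority:` loop of A; fuel is an upper bound on the iteration count
def pvLoopA (temp : List (Int × Int)) (n : Int) :
    Nat → Int → Int → List (Int × Int) → List Int → List Int
  | 0, _, _, _, acc => acc.reverse
  | _ + 1, _, _, [], acc => acc.reverse
  | fuel + 1, index, time, h :: t, acc =>
    let p := pvPopMin h t
    let time' := time + p.1.1
    let rest := if index < n then p.2 ++ [(PySem.List.pyGet? temp index).getD (0, 0)] else p.2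
    let heap' := rest.map (fun q => (q.1 + time', q.2))
    pvLoopA temp n fuel (index + 1) time' heap' ((p.1.2 + 1) :: acc)

def solution (N : Int) (coffee_times : List Int) : List Int :=
  let temp := (PySem.List.enumerate coffee_times 0).map (fun p => (p.2, p.1))
  let heap0 := (PySem.List.pyRange 0 N 1).foldl
      (fun h i => h ++ [(PySem.List.pyGet? temp i).getD (0, 0)]) []
  pvLoopA temp (PySem.List.len coffee_times) coffee_times.length N 0 heap0 []

-- ===== PORT B =====
-- Python tuple comparison `<` on (key, index) pairs
def pvTupLt (a b : Int × Int) : Bool := a.1 < b.1 || (a.1 == b.1 && a.2 < b.2)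

-- B's insort helper: walk past the elements `< item`, insert there
def pvIns (item : Int × Int) : List (Int × Int) → List (Int × Int)
  | [] => [item]
  | y :: ys => if pvTupLt y item then y :: pvIns item ys else item :: y :: ys

-- the `while pending:` loop of B: pop the head, one sorted insertion, lazy offset
def pvLoopB (cts : List Int) (n : Int) :
    Nat → Int → Int → Int → List (Int × Int) → List Int → List Int
  | 0, _, _, _, _, acc => acc.reverse
  | _ + 1, _, _, _, [], acc => acc.reverse
  | fuel + 1, index, time, off, (k, j) :: rest, acc =>
    let time' := time + (k + off)
    let pend := if index < n then pvIns ((PySem.List.pyGet? cts index).getD 0 - off, index) rest else rest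
    pvLoopB cts n fuel (index + 1) time' (off + time') pend ((j + 1) :: acc)

def solution_alt (N : Int) (coffee_times : List Int) : List Int :=
  let pending := (PySem.List.pyRange 0 N 1).foldl
      (fun l i => pvIns ((PySem.List.pyGet? coffee_times i).getD 0, i) l) []
  pvLoopB coffee_times (PySem.List.len coffee_times) coffee_times.length N 0 0 pending []

-- ===== PRECONDITION & SPEC =====
-- A raises IndexError (temp[i]) when N > len(coffee_times); nothing else raises.
def Pre_solution (N : Int) (coffee_times : List Int) : Prop :=
  N ≤ (coffee_times.length : Int)
instance (N : Int) (coffee_times : List Int) : Decidable (Pre_solution N coffee_times) := by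
  unfold Pre_solution; infer_instance

def pvWitness_solution : Int × List Int := (2, [3, 1, 4])

def Spec_solution (N : Int) (coffee_times : List Int) (out : List Int) : Prop := out = solution_alt N coffee_times
instance (N : Int) (coffee_times : List Int) (out : List Int) : Decidable (Spec_solution N coffee_times out) := by unfold Spec_solution; infer_instance

-- ===== CLAIM (what is proved, stated in full; the proofs are below) =====
def Claim_equal_solution : Prop := ∀ (N : Int) (coffee_times : List Int), Dom_solution N coffee_times → Pre_solution N coffee_times → Spec_solution N coffee_times (solution N coffee_times)

-- ===== LEMMAS AND PROOFS =====

def pvShift (c : Int) (q : Int × Int) : Int × Int := (q.1 + c, q.2)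

lemma pvTupLt_eq (a b : Int × Int) : pvTupLt a b = pvLexLt a b := rfl

lemma pvLexLt_iff (a b : Int × Int) :
    pvLexLt a b = true ↔ (a.1 < b.1 ∨ (a.1 = b.1 ∧ a.2 < b.2)) := by
  simp [pvLexLt, Bool.or_eq_true, Bool.and_eq_true, decide_eq_true_eq, beq_iff_eq]

lemma pvLexLt_false_iff (a b : Int × Int) :
    pvLexLt a b = false ↔ ¬ (a.1 < b.1 ∨ (a.1 = b.1 ∧ a.2 < b.2)) := by
  rw [← pvLexLt_iff, Bool.eq_false_iff, Ne]

lemma pvLexLt_trans {a b c : Int × Int}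
    (h1 : pvLexLt a b = true) (h2 : pvLexLt b c = true) : pvLexLt a c = true := by
  rw [pvLexLt_iff] at *; omega

lemma pvLexLt_le_trans {a b c : Int × Int}
    (h1 : pvLexLt a b = false) (h2 : pvLexLt b c = false) : pvLexLt a c = false := by
  rw [pvLexLt_false_iff] at *; omega

lemma pvLexLt_total {a b : Int × Int}
    (hne : a.2 ≠ b.2) (h : pvLexLt a b = false) : pvLexLt b a = true := by
  rw [pvLexLt_false_iff] at h; rw [pvLexLt_iff]; omega

lemma pvLexLt_shift (c : Int) (a b : Int × Int) :
    pvLexLt (pvShift c a) (pvShift c b) = pvLexLt a b := by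
  rw [Bool.eq_iff_iff, pvLexLt_iff, pvLexLt_iff]
  rcases a with ⟨a1, a2⟩; rcases b with ⟨b1, b2⟩
  simp only [pvShift]
  omega

lemma pvShift_shift (b c : Int) (l : List (Int × Int)) :
    (l.map (pvShift b)).map (pvShift c) = l.map (pvShift (b + c)) := by
  rw [List.map_map]; exact List.map_congr_left (fun q _ => by simp [pvShift]; ring)

lemma pvShift_zero (l : List (Int × Int)) : l.map (pvShift 0) = l := by
  have h : pvShift 0 = id := funext (fun q => by simp [pvShift])
  rw [h, List.map_id]

lemma pvPopMin_perm (m : Int × Int) (l : List (Int × Int)) :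
    ((pvPopMin m l).1 :: (pvPopMin m l).2).Perm (m :: l) := by
  induction l generalizing m with
  | nil => simp [pvPopMin]
  | cons x xs ih =>
    simp only [pvPopMin]
    by_cases h : pvLexLt x m = true
    · rw [if_pos h]
      exact (List.Perm.swap m _ _).trans ((ih x).cons m)
    · rw [if_neg h]
      exact ((List.Perm.swap x _ _).trans ((ih m).cons x)).trans (List.Perm.swap m x xs)

lemma pvPopMin_min (m : Int × Int) (l : List (Int × Int)) :
    ∀ x ∈ m :: l, pvLexLt x (pvPopMin m l).1 = false := by
  induction l generalizing m with
  | nil =>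
    intro x hx; simp at hx; subst hx
    simp [pvPopMin, pvLexLt_false_iff]
  | cons y ys ih =>
    intro x hx
    by_cases h : pvLexLt y m = true
    · have hres : (pvPopMin m (y :: ys)).1 = (pvPopMin y ys).1 := by
        simp only [pvPopMin]; rw [if_pos h]
      rw [hres]
      rcases List.mem_cons.mp hx with hxm | hx'
      · have hy := ih y y (by simp)
        have hh : pvLexLt y x = true := by rw [hxm]; exact h
        by_cases hc : pvLexLt x (pvPopMin y ys).1 = true
        · exact absurd (pvLexLt_trans hh hc) (by simp [hy])
        · exact Bool.eq_false_iff.mpr hc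
      · exact ih y x hx'
    · have h' : pvLexLt y m = false := Bool.eq_false_iff.mpr h
      have hres : (pvPopMin m (y :: ys)).1 = (pvPopMin m ys).1 := by
        simp only [pvPopMin]; rw [if_neg h]
      rw [hres]
      rcases List.mem_cons.mp hx with hxm | hx'
      · rw [hxm]; exact ih m m (by simp)
      · rcases List.mem_cons.mp hx' with hxy | hx''
        · rw [hxy]; exact pvLexLt_le_trans h' (ih m m (by simp))
        · exact ih m x (List.mem_cons_of_mem _ hx'')

lemma pvPopMin_eq_head (m h : Int × Int) (l r : List (Int × Int))
    (hp : (m :: l).Perm (h :: r)) (hmin : ∀ x ∈ r, pvLexLt h x = true) :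
    (pvPopMin m l).1 = h ∧ (pvPopMin m l).2.Perm r := by
  have hperm := pvPopMin_perm m l
  have hmem : (pvPopMin m l).1 ∈ h :: r := hp.subset (hperm.subset (by simp))
  rcases List.mem_cons.mp hmem with he | hr
  · refine ⟨he, ?_⟩
    have h2 := hperm.trans hp
    rw [he] at h2
    exact h2.cons_inv
  · exfalso
    have h1 := hmin _ hr
    have h2 : h ∈ m :: l := hp.symm.subset (by simp)
    have h3 := pvPopMin_min m l h h2
    rw [h1] at h3
    exact absurd h3 (by simp)

lemma pvIns_perm (a : Int × Int) (l : List (Int × Int)) :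
    (pvIns a l).Perm (a :: l) := by
  induction l with
  | nil => rfl
  | cons y ys ih =>
    simp only [pvIns]
    by_cases h : pvTupLt y a = true
    · rw [if_pos h]
      exact (ih.cons y).trans (List.Perm.swap a y ys)
    · rw [if_neg h]

lemma pvIns_pairwise (a : Int × Int) (l : List (Int × Int))
    (hs : l.Pairwise (fun x y => pvLexLt x y = true))
    (hd : ∀ y ∈ l, y.2 ≠ a.2) :
    (pvIns a l).Pairwise (fun x y => pvLexLt x y = true) := by
  induction l with
  | nil => simp [pvIns]
  | cons y ys ih =>
    rcases List.pairwise_cons.mp hs with ⟨hy, hys⟩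
    simp only [pvIns, pvTupLt_eq]
    by_cases h : pvLexLt y a = true
    · rw [if_pos h]
      refine List.pairwise_cons.mpr ⟨?_, ih hys (fun z hz => hd z (List.mem_cons_of_mem _ hz))⟩
      intro z hz
      rcases List.mem_cons.mp ((pvIns_perm a ys).subset hz) with rfl | hz'
      · exact h
      · exact hy _ hz'
    · rw [if_neg h]
      have hay : pvLexLt a y = true :=
        pvLexLt_total (hd y (by simp)) (Bool.eq_false_iff.mpr h)
      refine List.pairwise_cons.mpr ⟨?_, hs⟩
      intro z hz
      rcases List.mem_cons.mp hz with rfl | hz'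
      · exact hay
      · exact pvLexLt_trans hay (hy _ hz')

lemma pv_temp_get (cts : List Int) (i : Int) (h0 : 0 ≤ i) (h1 : i < (cts.length : Int)) :
    (PySem.List.pyGet? ((PySem.List.enumerate cts 0).map (fun p => (p.2, p.1))) i).getD (0, 0)
      = ((PySem.List.pyGet? cts i).getD 0, i) := by
  obtain ⟨k, rfl⟩ : ∃ k : Nat, i = (k : Int) := ⟨i.toNat, (Int.toNat_of_nonneg h0).symm⟩
  have hk : k < cts.length := by exact_mod_cast h1
  simp [PySem.List.getElem_enumerate, hk]

lemma pvLoopA_nil (temp : List (Int × Int)) (n : Int) (fuel : Nat)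
    (index time : Int) (acc : List Int) :
    pvLoopA temp n fuel index time [] acc = acc.reverse := by
  cases fuel <;> rfl

lemma pvLoopB_nil (cts : List Int) (n : Int) (fuel : Nat)
    (index time off : Int) (acc : List Int) :
    pvLoopB cts n fuel index time off [] acc = acc.reverse := by
  cases fuel <;> rfl

lemma pvLoop_eq (cts : List Int) (fuel : Nat) :
    ∀ (index time off : Int) (heapA heapB : List (Int × Int)) (acc : List Int),
      0 ≤ index →
      heapA.Perm (heapB.map (pvShift off)) →
      heapB.Pairwise (fun x y => pvLexLt x y = true) →
      (∀ q ∈ heapB, q.2 < index) →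
      pvLoopA ((PySem.List.enumerate cts 0).map (fun p => (p.2, p.1)))
          ((cts.length : Int)) fuel index time heapA acc
        = pvLoopB cts ((cts.length : Int)) fuel index time off heapB acc := by
  induction fuel with
  | zero => intro index time off heapA heapB acc _ _ _ _; rfl
  | succ fuel ih =>
    intro index time off heapA heapB acc hidx hperm hsort hbnd
    cases heapB with
    | nil =>
      have hA : heapA = [] := by simpa using hperm
      subst hA; rfl
    | cons kj rest =>
      obtain ⟨k, j⟩ := kj
      cases heapA with
      | nil => exact absurd hperm (by simp)
      | cons hh tt =>
        have hmin : ∀ x ∈ rest.map (pvShift off), pvLexLt (pvShift off (k, j)) x = true := by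
          intro x hx
          rcases List.mem_map.mp hx with ⟨y, hy, rfl⟩
          rw [pvLexLt_shift]
          exact (List.pairwise_cons.mp hsort).1 y hy
        obtain ⟨hp1, hp2⟩ := pvPopMin_eq_head hh (pvShift off (k, j)) tt (rest.map (pvShift off))
          (by simpa using hperm) hmin
        simp only [pvLoopA, pvLoopB]
        rw [hp1]
        simp only [pvShift]
        by_cases hlt : index < (cts.length : Int)
        · rw [if_pos hlt, if_pos hlt, pv_temp_get cts index hidx hlt]
          apply ih (index + 1) (time + (k + off)) (off + (time + (k + off)))
          · omega
          · -- permutation invariant after one step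
            refine ((hp2.append_right _).map _).trans ?_
            rw [show (fun q : Int × Int => (q.1 + (time + (k + off)), q.2))
                  = pvShift (time + (k + off)) from rfl]
            rw [List.map_append, pvShift_shift]
            refine List.Perm.trans ?_ (((pvIns_perm _ rest).map _).symm)
            simp only [List.map_nil, List.map_cons]
            rw [show pvShift (time + (k + off)) ((PySem.List.pyGet? cts index).getD 0, index)
                  = pvShift (off + (time + (k + off)))
                      ((PySem.List.pyGet? cts index).getD 0 - off, index) from by
                simp [pvShift]; ring]
            exact List.perm_append_singleton _ _
          · exact pvIns_pairwise _ _ (List.pairwise_cons.mp hsort).2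
              (fun y hy => Int.ne_of_lt (hbnd y (List.mem_cons_of_mem _ hy)))
          · intro q hq
            rcases List.mem_cons.mp ((pvIns_perm _ rest).subset hq) with rfl | hq'
            · omega
            · have := hbnd q (List.mem_cons_of_mem _ hq'); omega
        · rw [if_neg hlt, if_neg hlt]
          apply ih (index + 1) (time + (k + off)) (off + (time + (k + off)))
          · omega
          · refine (hp2.map _).trans ?_
            rw [show (fun q : Int × Int => (q.1 + (time + (k + off)), q.2))
                  = pvShift (time + (k + off)) from rfl]
            rw [pvShift_shift]
          · exact (List.pairwise_cons.mp hsort).2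
          · intro q hq
            have := hbnd q (List.mem_cons_of_mem _ hq); omega

lemma pv_foldl_ins (g : Int → Int × Int) (hg : ∀ i, (g i).2 = i) :
    ∀ (is : List Int) (s : List (Int × Int)),
      s.Pairwise (fun x y => pvLexLt x y = true) →
      (∀ q ∈ s, q.2 ∉ is) →
      is.Nodup →
      (is.foldl (fun l i => pvIns (g i) l) s).Perm (s ++ is.map g)
        ∧ (is.foldl (fun l i => pvIns (g i) l) s).Pairwise (fun x y => pvLexLt x y = true)
        ∧ (∀ q ∈ is.foldl (fun l i => pvIns (g i) l) s, q ∈ s ∨ q.2 ∈ is) := by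
  intro is
  induction is with
  | nil => intro s hs _ _; exact ⟨by simp, hs, fun q hq => Or.inl hq⟩
  | cons i is ih =>
    intro s hs hnot hnd
    rcases List.nodup_cons.mp hnd with ⟨hi, hnd'⟩
    have hs' : (pvIns (g i) s).Pairwise (fun x y => pvLexLt x y = true) :=
      pvIns_pairwise _ _ hs (fun y hy => by
        rw [hg]; exact fun e => hnot y hy (by simp [e]))
    have hnot' : ∀ q ∈ pvIns (g i) s, q.2 ∉ is := by
      intro q hq
      rcases List.mem_cons.mp ((pvIns_perm _ _).subset hq) with rfl | hq'
      · rw [hg]; exact hi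
      · exact fun e => hnot q hq' (List.mem_cons_of_mem _ e)
    obtain ⟨P, S, M⟩ := ih (pvIns (g i) s) hs' hnot' hnd'
    refine ⟨?_, by simpa using S, ?_⟩
    · rw [List.foldl_cons]
      refine P.trans ?_
      refine ((pvIns_perm (g i) s).append_right (is.map g)).trans ?_
      simp only [List.cons_append, List.map_cons]
      exact List.perm_middle.symm
    · intro q hq
      rw [List.foldl_cons] at hq
      rcases M q hq with hq' | hq''
      · rcases List.mem_cons.mp ((pvIns_perm _ _).subset hq') with rfl | hin
        · right; rw [hg]; exact List.mem_cons_self ..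
        · left; exact hin
      · right; exact List.mem_cons_of_mem _ hq''

-- ===== VERDICT (by name: the statement is the Claim_ definition above) =====
theorem solution_spec : Claim_equal_solution := by
  intro N cts _ hpre
  unfold Spec_solution solution solution_alt
  dsimp only
  rw [PySem.List.foldl_append_singleton_eq_map, List.nil_append]
  simp only [PySem.List.len_eq]
  by_cases hN : 0 ≤ N
  · have hA : (PySem.List.pyRange 0 N 1).map
        (fun i => (PySem.List.pyGet? ((PySem.List.enumerate cts 0).map (fun p => (p.2, p.1))) i).getD (0, 0))
        = (PySem.List.pyRange 0 N 1).map (fun i => ((PySem.List.pyGet? cts i).getD 0, i)) := by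
      refine List.map_congr_left (fun i hi => ?_)
      have hm := PySem.List.mem_pyRange_one.mp hi
      exact pv_temp_get cts i hm.1 (lt_of_lt_of_le hm.2 hpre)
    rw [hA]
    obtain ⟨P, S, M⟩ := pv_foldl_ins (fun i => ((PySem.List.pyGet? cts i).getD 0, i))
      (fun i => rfl) (PySem.List.pyRange 0 N 1) [] (by simp) (by simp)
      (PySem.List.nodup_pyRange_one 0 N)
    refine pvLoop_eq cts cts.length N 0 0 _ _ [] hN ?_ ?_ ?_
    · rw [pvShift_zero]
      exact P.symm
    · exact S
    · intro q hq
      rcases M q hq with h | h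
      · simp at h
      · exact (PySem.List.mem_pyRange_one.mp h).2
  · have hr : PySem.List.pyRange 0 N 1 = [] := PySem.List.pyRange_one_eq_nil (by omega)
    simp only [hr, List.map_nil, List.foldl_nil]
    rw [pvLoopA_nil, pvLoopB_nil]
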